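-- pv_equiv track=rewrite | github.com/Kivstahem/AOC-2025 | D9/D9_part_two.py | area_valid
-- ===== SOURCE A (Python) =====
-- def area_valid(xyz1,xyz2, play_field):
--     # x_cords
--     if xyz1[0] < xyz2[0]:
--         x_start = xyz1[0];
--         x_end   = xyz2[0];
--     else:
--         x_start = xyz2[0];
--         x_end   = xyz1[0];
--     # y-cords
--     if xyz1[1] < xyz2[1]:
--         y_start = xyz1[1];
--         y_end   = xyz2[1];
--     else:
--         y_start = xyz2[1];
--         y_end   = xyz1[1];
--     # check Y
--     for y in range(y_start, y_end + 1):
--         if ((x_start,y) not in play_field):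
--             return False;
--         if ((x_end,y) not in play_field):
--             return False
--     # check X
--     for x in range(x_start, x_end + 1):
--         if ((x,y_start) not in play_field):
--             return False;
--         if ((x,y_end) not in play_field):
--             return False;
--     return True;
-- ===== SOURCE B (Python) =====
-- def area_valid(xyz1, xyz2, play_field):
--     x_lo, x_hi = min(xyz1[0], xyz2[0]), max(xyz1[0], xyz2[0])
--     y_lo, y_hi = min(xyz1[1], xyz2[1]), max(xyz1[1], xyz2[1])
--     w = x_hi - x_lo + 1
--     h = y_hi - y_lo + 1
--     needed = w * h - max(w - 2, 0) * max(h - 2, 0)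
--     present = {(x, y) for (x, y) in play_field
--                if x_lo <= x <= x_hi and y_lo <= y <= y_hi
--                and (x == x_lo or x == x_hi or y == y_lo or y == y_hi)}
--     return len(present) == needed
-- ===== Notes on version B (the rewrite author's own statement) =====
-- stated objective: alternative
-- what changed: Instead of walking every perimeter cell and probing play_field (two early-exit loops over the coordinate ranges), B counts the distinct play_field cells lying on the rectangle's perimeter and compares that count with the closed-form number of perimeter cells, so the work depends on |play_field| rather than on the perimeter length.
import Mathlib
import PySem

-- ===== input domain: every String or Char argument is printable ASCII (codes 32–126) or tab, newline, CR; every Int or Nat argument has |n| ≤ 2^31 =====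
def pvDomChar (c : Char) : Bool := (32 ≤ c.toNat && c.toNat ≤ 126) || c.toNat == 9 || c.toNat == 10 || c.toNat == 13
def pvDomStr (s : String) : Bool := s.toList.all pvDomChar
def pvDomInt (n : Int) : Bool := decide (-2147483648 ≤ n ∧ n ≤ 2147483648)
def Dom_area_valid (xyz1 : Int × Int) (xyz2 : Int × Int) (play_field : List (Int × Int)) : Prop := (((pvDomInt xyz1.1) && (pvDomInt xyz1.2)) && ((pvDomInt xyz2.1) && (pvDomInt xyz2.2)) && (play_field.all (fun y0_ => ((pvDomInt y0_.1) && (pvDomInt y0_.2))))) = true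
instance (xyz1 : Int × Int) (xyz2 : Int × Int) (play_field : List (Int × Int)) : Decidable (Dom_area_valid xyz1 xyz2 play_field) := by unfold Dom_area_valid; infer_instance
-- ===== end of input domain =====

-- ===== PORT A =====
-- B replaces A's cell-by-cell perimeter walk by a count of the distinct play_field cells
-- lying on the perimeter, compared with the closed-form perimeter cell count.

-- A's first loop ('check Y'): 'for y in range(y_start, y_end + 1)' with early 'return False'.
def avChkY (xs_ xe_ : Int) (pf : List (Int × Int)) (y stop : Int) : Bool :=
  if _h : y < stop then
    if ¬ pf.contains (xs_, y) then false
    else if ¬ pf.contains (xe_, y) then false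
    else avChkY xs_ xe_ pf (y + 1) stop
  else true
termination_by (stop - y).toNat
decreasing_by omega

-- A's second loop ('check X').
def avChkX (ys_ ye_ : Int) (pf : List (Int × Int)) (x stop : Int) : Bool :=
  if _h : x < stop then
    if ¬ pf.contains (x, ys_) then false
    else if ¬ pf.contains (x, ye_) then false
    else avChkX ys_ ye_ pf (x + 1) stop
  else true
termination_by (stop - x).toNat
decreasing_by omega

def area_valid (xyz1 : Int × Int) (xyz2 : Int × Int) (play_field : List (Int × Int)) : Bool :=
  let x_start := if xyz1.1 < xyz2.1 then xyz1.1 else xyz2.1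
  let x_end   := if xyz1.1 < xyz2.1 then xyz2.1 else xyz1.1
  let y_start := if xyz1.2 < xyz2.2 then xyz1.2 else xyz2.2
  let y_end   := if xyz1.2 < xyz2.2 then xyz2.2 else xyz1.2
  if avChkY x_start x_end play_field y_start (y_end + 1) then
    avChkX y_start y_end play_field x_start (x_end + 1)
  else false

-- ===== PORT B =====
def area_valid_alt (xyz1 : Int × Int) (xyz2 : Int × Int) (play_field : List (Int × Int)) : Bool :=
  let x_lo := min xyz1.1 xyz2.1
  let x_hi := max xyz1.1 xyz2.1
  let y_lo := min xyz1.2 xyz2.2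
  let y_hi := max xyz1.2 xyz2.2
  let w := x_hi - x_lo + 1
  let h := y_hi - y_lo + 1
  let needed := w * h - max (w - 2) 0 * max (h - 2) 0
  let present : PySem.Set (Int × Int) :=
    PySem.Set.ofList (play_field.filter (fun p =>
      decide (x_lo ≤ p.1 ∧ p.1 ≤ x_hi ∧ y_lo ≤ p.2 ∧ p.2 ≤ y_hi ∧
        (p.1 = x_lo ∨ p.1 = x_hi ∨ p.2 = y_lo ∨ p.2 = y_hi))))
  decide (PySem.Set.len present = needed)

-- ===== PRECONDITION & SPEC =====
def Spec_area_valid (xyz1 : Int × Int) (xyz2 : Int × Int) (play_field : List (Int × Int)) (out : Bool) : Prop := out = area_valid_alt xyz1 xyz2 play_field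
instance (xyz1 : Int × Int) (xyz2 : Int × Int) (play_field : List (Int × Int)) (out : Bool) : Decidable (Spec_area_valid xyz1 xyz2 play_field out) := by unfold Spec_area_valid; infer_instance

-- ===== CLAIM (what is proved, stated in full; the proofs are below) =====
def Claim_equal_area_valid : Prop := ∀ (xyz1 : Int × Int) (xyz2 : Int × Int) (play_field : List (Int × Int)), Dom_area_valid xyz1 xyz2 play_field → Spec_area_valid xyz1 xyz2 play_field (area_valid xyz1 xyz2 play_field)

-- ===== LEMMAS AND PROOFS =====

theorem avChkY_iff (xs_ xe_ : Int) (pf : List (Int × Int)) (y stop : Int) :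
    avChkY xs_ xe_ pf y stop = true ↔
      ∀ z : Int, y ≤ z → z < stop → (xs_, z) ∈ pf ∧ (xe_, z) ∈ pf := by
  fun_induction avChkY xs_ xe_ pf y stop with
  | case1 y h h1 =>
    simp only [List.contains_eq_mem, decide_eq_true_eq] at h1
    simp only [Bool.false_eq_true, false_iff, not_forall]
    exact ⟨y, le_refl y, h, fun hc => h1 hc.1⟩
  | case2 y h h1 h2 =>
    simp only [List.contains_eq_mem, decide_eq_true_eq] at h2
    simp only [Bool.false_eq_true, false_iff, not_forall]
    exact ⟨y, le_refl y, h, fun hc => h2 hc.2⟩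
  | case3 y h h1 h2 ih =>
    simp only [List.contains_eq_mem, decide_eq_true_eq, not_not] at h1 h2
    rw [ih]
    constructor
    · intro hall z hz1 hz2
      rcases eq_or_lt_of_le hz1 with rfl | hlt
      · exact ⟨h1, h2⟩
      · exact hall z (by omega) hz2
    · intro hall z hz1 hz2
      exact hall z (by omega) hz2
  | case4 y h =>
    simp only [true_iff]
    intro z hz1 hz2
    omega

theorem avChkX_iff (ys_ ye_ : Int) (pf : List (Int × Int)) (x stop : Int) :
    avChkX ys_ ye_ pf x stop = true ↔
      ∀ z : Int, x ≤ z → z < stop → (z, ys_) ∈ pf ∧ (z, ye_) ∈ pf := by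
  fun_induction avChkX ys_ ye_ pf x stop with
  | case1 x h h1 =>
    simp only [List.contains_eq_mem, decide_eq_true_eq] at h1
    simp only [Bool.false_eq_true, false_iff, not_forall]
    exact ⟨x, le_refl x, h, fun hc => h1 hc.1⟩
  | case2 x h h1 h2 =>
    simp only [List.contains_eq_mem, decide_eq_true_eq] at h2
    simp only [Bool.false_eq_true, false_iff, not_forall]
    exact ⟨x, le_refl x, h, fun hc => h2 hc.2⟩
  | case3 x h h1 h2 ih =>
    simp only [List.contains_eq_mem, decide_eq_true_eq, not_not] at h1 h2
    rw [ih]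
    constructor
    · intro hall z hz1 hz2
      rcases eq_or_lt_of_le hz1 with rfl | hlt
      · exact ⟨h1, h2⟩
      · exact hall z (by omega) hz2
    · intro hall z hz1 hz2
      exact hall z (by omega) hz2
  | case4 x h =>
    simp only [true_iff]
    intro z hz1 hz2
    omega

-- the perimeter as a Finset: rectangle minus interior
noncomputable def avPerim (xlo xhi ylo yhi : Int) : Finset (Int × Int) :=
  (Finset.Icc xlo xhi ×ˢ Finset.Icc ylo yhi) \ (Finset.Ioo xlo xhi ×ˢ Finset.Ioo ylo yhi)

theorem avPerim_mem (xlo xhi ylo yhi : Int) (p : Int × Int) :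
    p ∈ avPerim xlo xhi ylo yhi ↔
      xlo ≤ p.1 ∧ p.1 ≤ xhi ∧ ylo ≤ p.2 ∧ p.2 ≤ yhi ∧
        (p.1 = xlo ∨ p.1 = xhi ∨ p.2 = ylo ∨ p.2 = yhi) := by
  simp only [avPerim, Finset.mem_sdiff, Finset.mem_product, Finset.mem_Icc, Finset.mem_Ioo]
  omega

theorem avPerim_card (xlo xhi ylo yhi : Int) (hx : xlo ≤ xhi) (hy : ylo ≤ yhi) :
    ((avPerim xlo xhi ylo yhi).card : Int) =
      (xhi - xlo + 1) * (yhi - ylo + 1) -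
        max (xhi - xlo + 1 - 2) 0 * max (yhi - ylo + 1 - 2) 0 := by
  have hsub : Finset.Ioo xlo xhi ×ˢ Finset.Ioo ylo yhi ⊆
      Finset.Icc xlo xhi ×ˢ Finset.Icc ylo yhi := by
    intro p hp
    simp only [Finset.mem_product, Finset.mem_Icc, Finset.mem_Ioo] at *
    omega
  rw [avPerim, Finset.card_sdiff, Finset.inter_eq_left.mpr hsub,
    Finset.card_product, Finset.card_product,
    Int.card_Icc, Int.card_Icc, Int.card_Ioo, Int.card_Ioo]
  have hle : (xhi - xlo - 1).toNat * (yhi - ylo - 1).toNat ≤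
      (xhi + 1 - xlo).toNat * (yhi + 1 - ylo).toNat :=
    Nat.mul_le_mul (Int.toNat_le_toNat (by omega)) (Int.toNat_le_toNat (by omega))
  push_cast [Nat.cast_sub hle, Int.toNat_eq_max]
  have h1 : max (xhi + 1 - xlo) 0 = xhi - xlo + 1 := by omega
  have h2 : max (yhi + 1 - ylo) 0 = yhi - ylo + 1 := by omega
  have h3 : max (xhi - xlo - 1) 0 = max (xhi - xlo + 1 - 2) 0 := by omega
  have h4 : max (yhi - ylo - 1) 0 = max (yhi - ylo + 1 - 2) 0 := by omega
  rw [h1, h2, h3, h4]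

-- the core counting equivalence
theorem av_key (xlo xhi ylo yhi : Int) (hx : xlo ≤ xhi) (hy : ylo ≤ yhi)
    (pf : List (Int × Int)) :
    ((∀ z : Int, ylo ≤ z → z < yhi + 1 → (xlo, z) ∈ pf ∧ (xhi, z) ∈ pf) ∧
     (∀ z : Int, xlo ≤ z → z < xhi + 1 → (z, ylo) ∈ pf ∧ (z, yhi) ∈ pf)) ↔
      PySem.Set.len (PySem.Set.ofList (pf.filter (fun p =>
        decide (xlo ≤ p.1 ∧ p.1 ≤ xhi ∧ ylo ≤ p.2 ∧ p.2 ≤ yhi ∧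
          (p.1 = xlo ∨ p.1 = xhi ∨ p.2 = ylo ∨ p.2 = yhi))))) =
        (xhi - xlo + 1) * (yhi - ylo + 1) -
          max (xhi - xlo + 1 - 2) 0 * max (yhi - ylo + 1 - 2) 0 := by
  classical
  set Q : Int × Int → Prop := fun p =>
    xlo ≤ p.1 ∧ p.1 ≤ xhi ∧ ylo ≤ p.2 ∧ p.2 ≤ yhi ∧
      (p.1 = xlo ∨ p.1 = xhi ∨ p.2 = ylo ∨ p.2 = yhi) with hQ
  set s : PySem.Set (Int × Int) :=
    PySem.Set.ofList (pf.filter (fun p => decide (Q p))) with hs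
  set P : Finset (Int × Int) := avPerim xlo xhi ylo yhi with hP
  -- the counted list is duplicate-free and its finset is play_field ∩ perimeter
  have hnodup : s.Nodup := PySem.Set.nodup_ofList _
  have hsfin : s.toFinset = pf.toFinset ∩ P := by
    ext p
    simp only [List.mem_toFinset, hs, PySem.Set.mem_ofList, List.mem_filter,
      decide_eq_true_eq, Finset.mem_inter, hP, avPerim_mem, hQ]
  have hlen : PySem.Set.len s = (s.toFinset.card : Int) := by
    rw [List.toFinset_card_of_nodup hnodup]
    simp [PySem.Set.len]
  -- A's loop conditions say exactly: every perimeter cell is in play_field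
  have hiff : ((∀ z : Int, ylo ≤ z → z < yhi + 1 → (xlo, z) ∈ pf ∧ (xhi, z) ∈ pf) ∧
      (∀ z : Int, xlo ≤ z → z < xhi + 1 → (z, ylo) ∈ pf ∧ (z, yhi) ∈ pf)) ↔
      ∀ p ∈ P, p ∈ pf := by
    constructor
    · rintro ⟨hY, hX⟩ p hp
      rw [hP, avPerim_mem] at hp
      obtain ⟨h1, h2, h3, h4, hc⟩ := hp
      obtain ⟨px, py⟩ := p
      rcases hc with rfl | rfl | rfl | rfl
      · exact (hY py h3 (by omega)).1
      · exact (hY py h3 (by omega)).2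
      · exact (hX px h1 (by omega)).1
      · exact (hX px h1 (by omega)).2
    · intro h
      constructor
      · intro z h1 h2
        exact ⟨h _ (by rw [hP, avPerim_mem]; dsimp only; omega),
               h _ (by rw [hP, avPerim_mem]; dsimp only; omega)⟩
      · intro z h1 h2
        exact ⟨h _ (by rw [hP, avPerim_mem]; dsimp only; omega),
               h _ (by rw [hP, avPerim_mem]; dsimp only; omega)⟩
  rw [hiff, hlen, ← avPerim_card xlo xhi ylo yhi hx hy, ← hP, hsfin, Int.natCast_inj]
  constructor
  · intro h
    have hsub : P ⊆ pf.toFinset := fun p hp => List.mem_toFinset.mpr (h p hp)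
    rw [Finset.inter_eq_right.mpr hsub]
  · intro hcard p hp
    have heq : pf.toFinset ∩ P = P :=
      Finset.eq_of_subset_of_card_le Finset.inter_subset_right (le_of_eq hcard.symm)
    exact List.mem_toFinset.mp (Finset.mem_inter.mp (heq.symm ▸ hp)).1

-- ===== VERDICT (by name: the statement is the Claim_ definition above) =====
theorem area_valid_spec : Claim_equal_area_valid := by
  intro xyz1 xyz2 pf _
  unfold Spec_area_valid area_valid area_valid_alt
  have hx1 : (if xyz1.1 < xyz2.1 then xyz1.1 else xyz2.1) = min xyz1.1 xyz2.1 := by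
    split <;> omega
  have hx2 : (if xyz1.1 < xyz2.1 then xyz2.1 else xyz1.1) = max xyz1.1 xyz2.1 := by
    split <;> omega
  have hy1 : (if xyz1.2 < xyz2.2 then xyz1.2 else xyz2.2) = min xyz1.2 xyz2.2 := by
    split <;> omega
  have hy2 : (if xyz1.2 < xyz2.2 then xyz2.2 else xyz1.2) = max xyz1.2 xyz2.2 := by
    split <;> omega
  have hif : ∀ (b c : Bool), (if b = true then c else false) = (b && c) := by decide
  simp only [hx1, hx2, hy1, hy2, hif]
  rw [Bool.eq_iff_iff]
  rw [Bool.and_eq_true, avChkY_iff, avChkX_iff, decide_eq_true_eq]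
  exact av_key (min xyz1.1 xyz2.1) (max xyz1.1 xyz2.1) (min xyz1.2 xyz2.2) (max xyz1.2 xyz2.2)
    (le_max_iff.mpr (Or.inl (min_le_left _ _))) (le_max_iff.mpr (Or.inl (min_le_left _ _))) pf
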